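-- pv_equiv track=rewrite | github.com/tycyd/codeforces | bit operation/1368D AND OR and square sum.py | and_or_and_square_sum
-- ===== SOURCE A (Python) =====
-- def and_or_and_square_sum(n, a):
--
--     bcnt = [0 for i in range(32)]
--
--     for v in a:
--         for i in range(32):
--             if v & (1 << i) > 0:
--                 bcnt[i] += 1
--
--     res = 0
--     cur = -1
--
--     while cur != 0:
--         cur = 0
--         for i in range(32):
--             if bcnt[i] > 0:
--                 cur += (1 << i)
--                 bcnt[i] -= 1
--         res += (cur * cur)
--
--     return res
-- ===== SOURCE B (Python) =====
-- def and_or_and_square_sum(n, a):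
--     # Closed form: the answer equals sum over bit pairs (i, j) of
--     # min(count_i, count_j) * 2^(i+j), so no repeated rebuild loop is needed.
--     cells = [(sum(1 for v in a if v & (1 << i) > 0), 1 << i) for i in range(32)]
--     return sum(min(c, d) * w * x for c, w in cells for d, x in cells)
-- ===== Notes on version B (the rewrite author's own statement) =====
-- stated objective: faster
-- what changed: Replaces A's repeated scan-decrement-and-square while loop (one full pass per remaining round, up to max bit-count rounds) by the closed pair form sum_{i,j} min(count_i, count_j) * 2^(i+j) computed once from the per-bit counts.
import Mathlib
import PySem

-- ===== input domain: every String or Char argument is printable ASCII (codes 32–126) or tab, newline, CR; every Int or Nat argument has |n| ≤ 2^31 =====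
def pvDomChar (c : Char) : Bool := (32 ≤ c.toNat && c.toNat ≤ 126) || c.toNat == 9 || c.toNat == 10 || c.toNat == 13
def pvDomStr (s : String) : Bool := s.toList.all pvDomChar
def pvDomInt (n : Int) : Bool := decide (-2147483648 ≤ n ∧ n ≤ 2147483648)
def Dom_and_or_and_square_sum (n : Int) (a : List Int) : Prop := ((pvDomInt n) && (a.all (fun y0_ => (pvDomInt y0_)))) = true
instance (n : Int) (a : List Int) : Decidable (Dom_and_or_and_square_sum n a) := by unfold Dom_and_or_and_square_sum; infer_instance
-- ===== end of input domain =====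

-- B replaces A's repeated rebuild-and-square while loop by the closed pair form
-- sum over bit pairs (i, j) of min(count_i, count_j) * 2^(i+j).

-- ===== PORT A =====
-- inner `for i in range(32)` of the counting loop, walking bcnt cell by cell (i = position);
-- `v & (1 << i)` ported as Int.land v (2^i) (exact, incl. negative v)
def pvAddBits (v : Int) (i : Nat) (b : List Int) : List Int :=
  match b with
  | [] => []
  | c :: r => (if 0 < Int.land v ((2:Int)^i) then c + 1 else c) :: pvAddBits v (i+1) r

-- body of the while loop: one `for i in range(32)` pass computing cur and decrementing positive cells
def pvStep (i : Nat) (b : List Int) : Int × List Int :=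
  match b with
  | [] => (0, [])
  | c :: r =>
    let p := pvStep (i+1) r
    if 0 < c then (p.1 + (2:Int)^i, (c - 1) :: p.2) else (p.1, c :: p.2)

def pvTsum (b : List Int) : Nat := (b.map Int.toNat).sum

-- termination measure fact for the while loop (cited by pvLoop's decreasing_by)
theorem pvStep_tsum (b : List Int) (i : Nat) :
    0 ≤ (pvStep i b).1 ∧ pvTsum (pvStep i b).2 ≤ pvTsum b ∧
      ((pvStep i b).1 ≠ 0 → pvTsum (pvStep i b).2 < pvTsum b) := by
  induction b generalizing i with
  | nil => simp [pvStep, pvTsum]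
  | cons c r ih =>
    rcases ih (i+1) with ⟨h1, h2, h3⟩
    have hp : (0:Int) < 2 ^ i := by positivity
    by_cases hc : 0 < c
    · simp only [pvStep, hc, if_pos]
      refine ⟨by omega, ?_, ?_⟩ <;> simp [pvTsum] at * <;> omega
    · simp only [pvStep, hc, if_neg, not_false_iff]
      refine ⟨h1, ?_, ?_⟩ <;> simp [pvTsum] at * <;> intros <;> omega

-- the `while cur != 0` loop (cur recomputed by pvStep each pass; res += cur*cur each pass)
def pvLoop (b : List Int) (res : Int) : Int :=
  let p := pvStep 0 b
  let res' := res + p.1 * p.1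
  if p.1 = 0 then res' else pvLoop p.2 res'
termination_by pvTsum b
decreasing_by exact (pvStep_tsum b 0).2.2 (by assumption)

def and_or_and_square_sum (n : Int) (a : List Int) : Int :=
  let bcnt := a.foldl (fun b v => pvAddBits v 0 b) (List.replicate 32 0)
  pvLoop bcnt 0

-- ===== PORT B =====
-- cells = [(count of values with bit i set, 1 << i) for i in range(32)]; `1 << i` ported as 2^i
def pvCells (a : List Int) : List (Int × Int) :=
  (PySem.List.pyRange 0 32 1).map (fun i =>
    (((a.countP (fun v => decide (0 < Int.land v ((2:Int)^i.toNat)))) : Int), (2:Int)^i.toNat))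

def and_or_and_square_sum_alt (n : Int) (a : List Int) : Int :=
  let cells := pvCells a
  (cells.flatMap (fun cw => cells.map (fun dx => min cw.1 dx.1 * cw.2 * dx.2))).sum

-- ===== PRECONDITION & SPEC =====
def Spec_and_or_and_square_sum (n : Int) (a : List Int) (out : Int) : Prop := out = and_or_and_square_sum_alt n a
instance (n : Int) (a : List Int) (out : Int) : Decidable (Spec_and_or_and_square_sum n a out) := by unfold Spec_and_or_and_square_sum; infer_instance

-- ===== CLAIM (what is proved, stated in full; the proofs are below) =====
def Claim_equal_and_or_and_square_sum : Prop := ∀ (n : Int) (a : List Int), Dom_and_or_and_square_sum n a → Spec_and_or_and_square_sum n a (and_or_and_square_sum n a)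

-- ===== LEMMAS AND PROOFS =====

-- abstract (count, weight) cell lists
def pvS (l : List (Int × Int)) : Int := (l.map (fun p => if 0 < p.1 then p.2 else 0)).sum
def pvM (c : Int) (l : List (Int × Int)) : Int := (l.map (fun p => min c p.1 * p.2)).sum
def pvP (l full : List (Int × Int)) : Int := (l.map (fun p => p.2 * pvM p.1 full)).sum
def pvDec (l : List (Int × Int)) : List (Int × Int) :=
  l.map (fun p => (if 0 < p.1 then p.1 - 1 else p.1, p.2))
def pvW : List Int → Nat → List (Int × Int)
  | [], _ => []
  | c :: r, i => (c, (2:Int)^i) :: pvW r (i+1)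

@[simp] theorem pvS_nil : pvS [] = 0 := rfl
@[simp] theorem pvS_cons (p : Int × Int) (t : List (Int × Int)) :
    pvS (p :: t) = (if 0 < p.1 then p.2 else 0) + pvS t := by simp [pvS]
@[simp] theorem pvM_nil (c : Int) : pvM c [] = 0 := rfl
@[simp] theorem pvM_cons (c : Int) (p : Int × Int) (t : List (Int × Int)) :
    pvM c (p :: t) = min c p.1 * p.2 + pvM c t := by simp [pvM]
@[simp] theorem pvP_nil (full : List (Int × Int)) : pvP [] full = 0 := rfl
@[simp] theorem pvP_cons (p : Int × Int) (t full : List (Int × Int)) :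
    pvP (p :: t) full = p.2 * pvM p.1 full + pvP t full := by simp [pvP]
@[simp] theorem pvDec_nil : pvDec [] = [] := rfl
@[simp] theorem pvDec_cons (p : Int × Int) (t : List (Int × Int)) :
    pvDec (p :: t) = ((if 0 < p.1 then p.1 - 1 else p.1, p.2)) :: pvDec t := by simp [pvDec]

theorem pvStep_fst (b : List Int) (i : Nat) : (pvStep i b).1 = pvS (pvW b i) := by
  induction b generalizing i with
  | nil => simp [pvStep, pvW]
  | cons c r ih =>
    by_cases hc : 0 < c <;> simp [pvStep, pvW, hc, ih (i+1)] <;> ring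

theorem pvStep_snd (b : List Int) (i : Nat) : pvW (pvStep i b).2 i = pvDec (pvW b i) := by
  induction b generalizing i with
  | nil => simp [pvStep, pvW]
  | cons c r ih =>
    by_cases hc : 0 < c <;> simp [pvStep, pvW, hc, ih (i+1)]

theorem pvStep_nonneg (b : List Int) (i : Nat) (hb : ∀ c ∈ b, 0 ≤ c) :
    ∀ c ∈ (pvStep i b).2, 0 ≤ c := by
  induction b generalizing i with
  | nil => simp [pvStep]
  | cons c r ih =>
    have hc0 := hb c (by simp)
    have hr : ∀ c ∈ r, 0 ≤ c := fun x hx => hb x (by simp [hx])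
    by_cases hc : 0 < c <;> simp [pvStep, hc] <;>
      exact ⟨by omega, fun x hx => ih (i+1) hr x hx⟩

theorem pvM_zero (l : List (Int × Int)) (h : ∀ p ∈ l, 0 ≤ p.1) : pvM 0 l = 0 := by
  induction l with
  | nil => rfl
  | cons p t ih =>
    have h1 := h p (by simp)
    have hmin : min 0 p.1 = 0 := by omega
    rw [pvM_cons, hmin, zero_mul, zero_add, ih (fun q hq => h q (by simp [hq]))]

theorem pvM_dec (full : List (Int × Int)) (c : Int) (hc : 0 < c)
    (h : ∀ p ∈ full, 0 ≤ p.1) :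
    pvM (c - 1) (pvDec full) = pvM c full - pvS full := by
  induction full with
  | nil => simp
  | cons p t ih =>
    have h1 := h p (by simp)
    have ht := ih (fun q hq => h q (by simp [hq]))
    by_cases hd : 0 < p.1
    · have hmin : min (c - 1) (p.1 - 1) = min c p.1 - 1 := by omega
      simp only [pvDec_cons, pvM_cons, pvS_cons, if_pos hd, hmin]
      nlinarith [ht]
    · have hmin : min (c - 1) p.1 = min c p.1 := by omega
      simp only [pvDec_cons, pvM_cons, pvS_cons, if_neg hd, hmin]
      omega

theorem pvP_dec (l full : List (Int × Int)) (hl : ∀ p ∈ l, 0 ≤ p.1)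
    (hf : ∀ p ∈ full, 0 ≤ p.1) :
    pvP (pvDec l) (pvDec full) = pvP l full - pvS l * pvS full := by
  induction l with
  | nil => simp
  | cons p t ih =>
    have h1 := hl p (by simp)
    have ht := ih (fun q hq => hl q (by simp [hq]))
    by_cases hd : 0 < p.1
    · have hm := pvM_dec full p.1 hd hf
      simp only [pvDec_cons, pvP_cons, pvS_cons, if_pos hd, hm]
      nlinarith [ht]
    · have hz : p.1 = 0 := by omega
      have hm : pvM p.1 (pvDec full) = pvM p.1 full := by
        rw [hz, pvM_zero _ hf, pvM_zero]
        intro q hq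
        simp only [pvDec, List.mem_map] at hq
        obtain ⟨r, hr, rfl⟩ := hq
        have := hf r hr
        by_cases h0 : 0 < r.1 <;> simp [h0] <;> omega
      simp only [pvDec_cons, pvP_cons, pvS_cons, if_neg hd, hm]
      nlinarith [ht]

theorem pvS_nonneg (l : List (Int × Int)) (hw : ∀ p ∈ l, 0 < p.2) : 0 ≤ pvS l := by
  induction l with
  | nil => simp
  | cons p t ih =>
    have h2 := hw p (by simp)
    have ht := ih (fun q hq => hw q (by simp [hq]))
    by_cases h0 : 0 < p.1 <;> simp [h0] <;> omega

theorem pvS_zero_P (l full : List (Int × Int)) (hl : ∀ p ∈ l, 0 ≤ p.1)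
    (hw : ∀ p ∈ l, 0 < p.2) (hf : ∀ p ∈ full, 0 ≤ p.1) (hS : pvS l = 0) :
    pvP l full = 0 := by
  induction l with
  | nil => rfl
  | cons p t ih =>
    have h1 := hl p (by simp)
    have h2 := hw p (by simp)
    have hSn : 0 ≤ pvS t := pvS_nonneg t (fun q hq => hw q (by simp [hq]))
    rw [pvS_cons] at hS
    by_cases h0 : 0 < p.1
    · rw [if_pos h0] at hS; omega
    · have hz : p.1 = 0 := by omega
      rw [if_neg h0] at hS
      rw [pvP_cons, hz, pvM_zero full hf, mul_zero, zero_add]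
      exact ih (fun x hx => hl x (by simp [hx])) (fun x hx => hw x (by simp [hx])) (by omega)

theorem pvW_nonneg (b : List Int) (i : Nat) (hb : ∀ c ∈ b, 0 ≤ c) :
    ∀ p ∈ pvW b i, 0 ≤ p.1 := by
  induction b generalizing i with
  | nil => simp [pvW]
  | cons c r ih =>
    simp only [pvW, List.mem_cons]
    rintro p (rfl | hp)
    · exact hb c (by simp)
    · exact ih (i+1) (fun x hx => hb x (by simp [hx])) p hp

theorem pvW_posw (b : List Int) (i : Nat) : ∀ p ∈ pvW b i, 0 < p.2 := by
  induction b generalizing i with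
  | nil => simp [pvW]
  | cons c r ih =>
    simp only [pvW, List.mem_cons]
    rintro p (rfl | hp)
    · positivity
    · exact ih (i+1) p hp

theorem pvLoop_eq (N : Nat) : ∀ (b : List Int), pvTsum b = N → (∀ c ∈ b, 0 ≤ c) →
    ∀ res, pvLoop b res = res + pvP (pvW b 0) (pvW b 0) := by
  induction N using Nat.strong_induction_on with
  | _ N ih =>
    intro b hN hb res
    rw [pvLoop]
    have hfst := pvStep_fst b 0
    have hsnd := pvStep_snd b 0
    have hnn := pvW_nonneg b 0 hb
    by_cases h0 : (pvStep 0 b).1 = 0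
    · simp only [h0, if_pos]
      have hP := pvS_zero_P (pvW b 0) (pvW b 0) hnn (pvW_posw b 0) hnn (by rw [← hfst, h0])
      simp [hP]
    · simp only [h0, if_neg, not_false_iff]
      have hlt : pvTsum (pvStep 0 b).2 < N := hN ▸ (pvStep_tsum b 0).2.2 h0
      have hrec := ih _ hlt (pvStep 0 b).2 rfl (pvStep_nonneg b 0 hb) (res + (pvStep 0 b).1 * (pvStep 0 b).1)
      rw [hrec, hsnd, pvP_dec _ _ hnn hnn, hfst]
      ring

-- bcnt characterization
theorem pvAddBits_range (v : Int) : ∀ (k i : Nat) (g : Nat → Int),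
    pvAddBits v i ((List.range' i k).map g) =
      (List.range' i k).map (fun j => g j + if 0 < Int.land v ((2:Int)^j) then 1 else 0) := by
  intro k
  induction k with
  | zero => intro i g; simp [pvAddBits]
  | succ k ihk =>
    intro i g
    rw [List.range'_succ]
    simp only [List.map_cons, pvAddBits, ihk (i+1) g]
    by_cases h : 0 < Int.land v ((2:Int)^i) <;> simp [h]

theorem pvFold_bits (a : List Int) : ∀ (g : Nat → Int),
    a.foldl (fun b v => pvAddBits v 0 b) ((List.range' 0 32).map g) =
      (List.range' 0 32).map
        (fun j => g j + (a.countP (fun v => decide (0 < Int.land v ((2:Int)^j))) : Int)) := by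
  induction a with
  | nil => intro g; simp
  | cons v t ih =>
    intro g
    simp only [List.foldl_cons, pvAddBits_range v 32 0 g, ih]
    apply List.map_congr_left
    intro j _
    simp only [List.countP_cons]
    by_cases h : 0 < Int.land v ((2:Int)^j) <;> simp [h] <;> push_cast <;> ring

theorem pvW_range (k : Nat) : ∀ (i : Nat) (g : Nat → Int),
    pvW ((List.range' i k).map g) i = (List.range' i k).map (fun j => (g j, (2:Int)^j)) := by
  induction k with
  | zero => intro i g; simp [pvW]
  | succ k ihk =>
    intro i g
    rw [List.range'_succ]
    simp [pvW, ihk (i+1) g]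

theorem pvCells_eq (a : List Int) :
    pvCells a = (List.range' 0 32).map
      (fun j => ((a.countP (fun v => decide (0 < Int.land v ((2:Int)^j))) : Int), (2:Int)^j)) := by
  have hr : PySem.List.pyRange 0 32 1 = (List.range' 0 32).map Int.ofNat := by decide
  rw [pvCells, hr, List.map_map]
  apply List.map_congr_left
  intro j _
  simp
  rfl

theorem pvAlt_P (l : List (Int × Int)) :
    (l.flatMap (fun cw => l.map (fun dx => min cw.1 dx.1 * cw.2 * dx.2))).sum = pvP l l := by
  have hflat : ∀ (m : List (Int × Int)) (f : Int × Int → List Int),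
      (m.flatMap f).sum = (m.map fun x => (f x).sum).sum := by
    intro m f
    induction m with
    | nil => rfl
    | cons h t ihm => simp [List.flatMap_cons, ihm]
  rw [hflat]
  apply congrArg
  apply List.map_congr_left
  intro p _
  have hcg : (l.map (fun dx => min p.1 dx.1 * p.2 * dx.2)) =
      (l.map (fun dx => p.2 * (min p.1 dx.1 * dx.2))) := by
    apply List.map_congr_left; intro q _; ring
  rw [hcg, List.sum_map_mul_left]
  rfl

-- ===== VERDICT (by name: the statement is the Claim_ definition above) =====
theorem and_or_and_square_sum_spec : Claim_equal_and_or_and_square_sum := by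
  intro n a _
  unfold Spec_and_or_and_square_sum and_or_and_square_sum and_or_and_square_sum_alt
  have hrep : (List.replicate 32 (0:Int)) = (List.range' 0 32).map (fun _ => (0:Int)) := by decide
  rw [hrep, pvFold_bits a (fun _ => 0)]
  have hmc : (List.range' 0 32).map
      (fun j => (fun _ => (0:Int)) j + (a.countP (fun v => decide (0 < Int.land v ((2:Int)^j))) : Int)) =
      (List.range' 0 32).map (fun j => (a.countP (fun v => decide (0 < Int.land v ((2:Int)^j))) : Int)) := by
    apply List.map_congr_left; intro j _; simp
  rw [hmc, pvLoop_eq (pvTsum _) _ rfl ?hnn 0, pvW_range 32 0, pvAlt_P, pvCells_eq]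
  · simp
  case hnn =>
    intro c hc
    simp only [List.mem_map] at hc
    obtain ⟨j, _, rfl⟩ := hc
    positivity
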